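-- pv_equiv track=rewrite | github.com/ren-perez/fb-marketplace-poster | app/prepare_marketplace_listings.py | parse_features
-- ===== SOURCE A (Python) =====
-- def parse_features(raw: str) -> tuple[str, str]:
--     """Return (ext_color, int_color) parsed from the features string."""
--     ext_color = ""
--     int_color = ""
--     if not raw:
--         return ext_color, int_color
--     for part in raw.split(","):
--         part = part.strip()
--         if part.startswith("Exterior:"):
--             ext_color = part[len("Exterior:"):].strip()
--         elif part.startswith("Interior:"):
--             int_color = part[len("Interior:"):].strip()
--     return ext_color, int_color
-- ===== SOURCE B (Python) =====
-- def parse_features(raw: str) -> tuple[str, str]: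
--     """Return (ext_color, int_color) parsed from the features string."""
--     if not raw:
--         return "", ""
--     parts = [p.strip() for p in raw.split(",")]
--
--     def last_value(prefix: str) -> str:
--         for p in reversed(parts):
--             if p.startswith(prefix):
--                 return p[len(prefix):].strip()
--         return ""
--
--     return last_value("Exterior:"), last_value("Interior:")
-- ===== Notes on version B (the rewrite author's own statement) =====
-- stated objective: alternative
-- what changed: Replaces A's forward fold that keeps overwriting two accumulators with two reversed scans that each stop at the first (i.e. last-in-order) matching part, after stripping all parts once up front.
import Mathlib
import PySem

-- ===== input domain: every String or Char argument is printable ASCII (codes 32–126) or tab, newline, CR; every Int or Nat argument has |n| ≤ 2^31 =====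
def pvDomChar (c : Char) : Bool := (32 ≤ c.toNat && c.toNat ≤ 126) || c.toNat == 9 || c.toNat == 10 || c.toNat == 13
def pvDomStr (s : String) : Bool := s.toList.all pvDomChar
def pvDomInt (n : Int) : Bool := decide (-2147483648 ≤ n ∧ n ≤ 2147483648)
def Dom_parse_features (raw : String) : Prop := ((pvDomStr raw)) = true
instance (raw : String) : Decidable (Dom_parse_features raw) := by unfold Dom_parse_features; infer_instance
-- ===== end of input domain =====

-- B replaces A's forward overwrite-fold by two reversed scans, each stopping at the last matching part (alternative decomposition, same cost).

-- ===== PORT A =====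
def parse_features (raw : String) : String × String :=
  if raw = "" then ("", "")
  else
    ((PySem.Str.split? raw ",").getD []).foldl
      (fun (acc : String × String) part =>
        let p := PySem.Str.strip part
        if PySem.Str.startswith p "Exterior:" then
          (PySem.Str.strip (PySem.Str.slice p (some (PySem.Str.len "Exterior:")) none), acc.2)
        else if PySem.Str.startswith p "Interior:" then
          (acc.1, PySem.Str.strip (PySem.Str.slice p (some (PySem.Str.len "Interior:")) none))
        else acc)
      ("", "")

-- ===== PORT B =====
-- B-side helper: value of the last part carrying the prefix (scan the reversed list, stop at the first hit)
def pfLastValue (parts : List String) (pre : String) : String :=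
  match parts.reverse.find? (fun p => PySem.Str.startswith p pre) with
  | some p => PySem.Str.strip (PySem.Str.slice p (some (PySem.Str.len pre)) none)
  | none => ""

def parse_features_alt (raw : String) : String × String :=
  if raw = "" then ("", "")
  else
    let parts := ((PySem.Str.split? raw ",").getD []).map PySem.Str.strip
    (pfLastValue parts "Exterior:", pfLastValue parts "Interior:")

-- ===== PRECONDITION & SPEC =====
def Spec_parse_features (raw : String) (out : String × String) : Prop := out = parse_features_alt raw
instance (raw : String) (out : String × String) : Decidable (Spec_parse_features raw out) := by unfold Spec_parse_features; infer_instance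

-- ===== CLAIM (what is proved, stated in full; the proofs are below) =====
def Claim_equal_parse_features : Prop := ∀ (raw : String), Dom_parse_features raw → Spec_parse_features raw (parse_features raw)

-- ===== LEMMAS AND PROOFS =====

-- the two prefixes are mutually exclusive (they differ at the first character)
theorem pf_disjoint (p : String) (h : PySem.Str.startswith p "Exterior:" = true) :
    PySem.Str.startswith p "Interior:" = false := by
  by_contra hne
  rw [Bool.not_eq_false] at hne
  rw [PySem.Str.startswith_eq, PySem.Chars.startswith_iff] at h hne
  obtain ⟨t1, h1⟩ := h
  obtain ⟨t2, h2⟩ := hne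
  rw [← h2] at h1
  simp at h1

-- A's overwrite fold computes, in each component, the value of the LAST matching part
theorem foldl_eq_lastValue (l : List String) (e i : String) :
    l.foldl
      (fun (acc : String × String) p =>
        if PySem.Str.startswith p "Exterior:" then
          (PySem.Str.strip (PySem.Str.slice p (some (PySem.Str.len "Exterior:")) none), acc.2)
        else if PySem.Str.startswith p "Interior:" then
          (acc.1, PySem.Str.strip (PySem.Str.slice p (some (PySem.Str.len "Interior:")) none))
        else acc)
      (e, i)
    = ((match l.reverse.find? (fun p => PySem.Str.startswith p "Exterior:") with
        | some p => PySem.Str.strip (PySem.Str.slice p (some (PySem.Str.len "Exterior:")) none)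
        | none => e),
       (match l.reverse.find? (fun p => PySem.Str.startswith p "Interior:") with
        | some p => PySem.Str.strip (PySem.Str.slice p (some (PySem.Str.len "Interior:")) none)
        | none => i)) := by
  induction l using List.reverseRecOn generalizing e i with
  | nil => simp
  | append_singleton l x ih =>
    rw [List.foldl_append, ih, List.reverse_append]
    simp only [List.reverse_cons, List.reverse_nil, List.nil_append, List.singleton_append,
      List.foldl_cons, List.foldl_nil, List.find?_cons]
    by_cases hx : PySem.Str.startswith x "Exterior:" = true
    · have hd := pf_disjoint x hx
      have hx' : PySem.Chars.startswith x.toList ['E','x','t','e','r','i','o','r',':'] = true := hx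
      have hd' : PySem.Chars.startswith x.toList ['I','n','t','e','r','i','o','r',':'] = false := hd
      simp [hx', hd']
    · rw [Bool.not_eq_true] at hx
      have hx' : PySem.Chars.startswith x.toList ['E','x','t','e','r','i','o','r',':'] = false := hx
      by_cases hi : PySem.Str.startswith x "Interior:" = true
      · have hi' : PySem.Chars.startswith x.toList ['I','n','t','e','r','i','o','r',':'] = true := hi
        simp [hx', hi']
      · rw [Bool.not_eq_true] at hi
        have hi' : PySem.Chars.startswith x.toList ['I','n','t','e','r','i','o','r',':'] = false := hi
        simp [hx', hi']

-- stripping inside A's loop body = mapping strip first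
theorem foldA_strip_map (l : List String) :
    l.foldl
      (fun (acc : String × String) part =>
        if PySem.Str.startswith (PySem.Str.strip part) "Exterior:" then
          (PySem.Str.strip (PySem.Str.slice (PySem.Str.strip part) (some (PySem.Str.len "Exterior:")) none), acc.2)
        else if PySem.Str.startswith (PySem.Str.strip part) "Interior:" then
          (acc.1, PySem.Str.strip (PySem.Str.slice (PySem.Str.strip part) (some (PySem.Str.len "Interior:")) none))
        else acc)
      ("", "")
    = (l.map PySem.Str.strip).foldl
      (fun (acc : String × String) p =>
        if PySem.Str.startswith p "Exterior:" then
          (PySem.Str.strip (PySem.Str.slice p (some (PySem.Str.len "Exterior:")) none), acc.2)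
        else if PySem.Str.startswith p "Interior:" then
          (acc.1, PySem.Str.strip (PySem.Str.slice p (some (PySem.Str.len "Interior:")) none))
        else acc)
      ("", "") := by rw [List.foldl_map]

-- ===== VERDICT (by name: the statement is the Claim_ definition above) =====
theorem parse_features_spec : Claim_equal_parse_features := by
  intro raw _
  unfold Spec_parse_features parse_features parse_features_alt
  by_cases h : raw = ""
  · simp [h]
  · simp only [h, if_false]
    rw [foldA_strip_map, foldl_eq_lastValue]
    rfl
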